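-- pv_equiv track=rewrite | github.com/quantumquackerydivinearts-cell/DjinnOS-Shyagzun | scripts/build_renderer_stream_manifest_v1.py | _chunk_bounds
-- ===== SOURCE A (Python) =====
-- from typing import Any
--
-- def _safe_int(value: Any, default: int = 0) -> int:
--     try:
--         return int(value)
--     except Exception:
--         return default
--
-- def _chunk_bounds(rows: list[dict[str, Any]]) -> dict[str, int]:
--     xs = [_safe_int(v.get("x"), 0) for v in rows]
--     ys = [_safe_int(v.get("y"), 0) for v in rows]
--     zs = [_safe_int(v.get("z"), 0) for v in rows]
--     return {
--         "min_x": min(xs) if xs else 0,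
--         "max_x": max(xs) if xs else 0,
--         "min_y": min(ys) if ys else 0,
--         "max_y": max(ys) if ys else 0,
--         "min_z": min(zs) if zs else 0,
--         "max_z": max(zs) if zs else 0,
--     }
-- ===== SOURCE B (Python) =====
-- from typing import Any
--
-- def _safe_int(value: Any, default: int = 0) -> int:
--     try:
--         return int(value)
--     except Exception:
--         return default
--
-- def _chunk_bounds(rows: list) -> dict:
--     # one pass, six running extremes seeded from the first row
--     st = None
--     for v in rows:
--         x = _safe_int(v.get("x"), 0)
--         y = _safe_int(v.get("y"), 0)
--         z = _safe_int(v.get("z"), 0)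
--         if st is None:
--             st = (x, x, y, y, z, z)
--         else:
--             mnx, mxx, mny, mxy, mnz, mxz = st
--             st = (min(mnx, x), max(mxx, x), min(mny, y),
--                   max(mxy, y), min(mnz, z), max(mxz, z))
--     if st is None:
--         return {"min_x": 0, "max_x": 0, "min_y": 0,
--                 "max_y": 0, "min_z": 0, "max_z": 0}
--     mnx, mxx, mny, mxy, mnz, mxz = st
--     return {"min_x": mnx, "max_x": mxx, "min_y": mny,
--             "max_y": mxy, "min_z": mnz, "max_z": mxz}
-- ===== Notes on version B (the rewrite author's own statement) =====
-- stated objective: alternative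
-- what changed: Replaces the three mapped lists and six separate min/max scans (seven passes, three intermediate lists) with a single loop over rows maintaining six running extremes seeded from the first row.
import Mathlib
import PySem

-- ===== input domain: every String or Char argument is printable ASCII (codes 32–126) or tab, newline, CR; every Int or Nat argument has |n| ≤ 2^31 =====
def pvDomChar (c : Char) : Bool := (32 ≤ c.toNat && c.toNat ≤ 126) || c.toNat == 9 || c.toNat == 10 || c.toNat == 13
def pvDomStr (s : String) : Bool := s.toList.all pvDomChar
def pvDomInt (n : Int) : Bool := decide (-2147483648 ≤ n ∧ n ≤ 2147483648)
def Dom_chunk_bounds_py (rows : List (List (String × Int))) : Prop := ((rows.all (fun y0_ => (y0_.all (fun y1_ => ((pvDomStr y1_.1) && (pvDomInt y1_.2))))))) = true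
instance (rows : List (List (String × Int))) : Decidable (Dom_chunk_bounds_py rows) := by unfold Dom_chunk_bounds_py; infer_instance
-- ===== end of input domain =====

-- B fuses A's three mapped lists and six min/max scans into one loop with six running extremes (alternative decomposition; return-value equivalence).


-- ===== PORT A =====
def pvLookup (v : List (String × Int)) (k : String) : Int :=
  (PySem.Dict.mk v).getD k 0

def chunk_bounds_py (rows : List (List (String × Int))) : List (String × Int) :=
  let xs := rows.map (fun v => pvLookup v "x")
  let ys := rows.map (fun v => pvLookup v "y")
  let zs := rows.map (fun v => pvLookup v "z")
  [("min_x", (PySem.List.min? xs (fun a => a)).getD 0),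
   ("max_x", (PySem.List.max? xs (fun a => a)).getD 0),
   ("min_y", (PySem.List.min? ys (fun a => a)).getD 0),
   ("max_y", (PySem.List.max? ys (fun a => a)).getD 0),
   ("min_z", (PySem.List.min? zs (fun a => a)).getD 0),
   ("max_z", (PySem.List.max? zs (fun a => a)).getD 0)]

-- ===== PORT B =====
def pvStep (st : Option (Int × Int × Int × Int × Int × Int)) (v : List (String × Int)) :
    Option (Int × Int × Int × Int × Int × Int) :=
  let x := pvLookup v "x"
  let y := pvLookup v "y"
  let z := pvLookup v "z"
  match st with
  | none => some (x, x, y, y, z, z)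
  | some (mnx, mxx, mny, mxy, mnz, mxz) =>
      some (min mnx x, max mxx x, min mny y, max mxy y, min mnz z, max mxz z)

def chunk_bounds_py_alt (rows : List (List (String × Int))) : List (String × Int) :=
  match rows.foldl pvStep none with
  | none =>
      [("min_x", 0), ("max_x", 0), ("min_y", 0), ("max_y", 0), ("min_z", 0), ("max_z", 0)]
  | some (mnx, mxx, mny, mxy, mnz, mxz) =>
      [("min_x", mnx), ("max_x", mxx), ("min_y", mny), ("max_y", mxy), ("min_z", mnz), ("max_z", mxz)]

-- ===== PRECONDITION & SPEC =====
def Spec_chunk_bounds_py (rows : List (List (String × Int))) (out : List (String × Int)) : Prop := out = chunk_bounds_py_alt rows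
instance (rows : List (List (String × Int))) (out : List (String × Int)) : Decidable (Spec_chunk_bounds_py rows out) := by unfold Spec_chunk_bounds_py; infer_instance

-- ===== CLAIM (what is proved, stated in full; the proofs are below) =====
def Claim_equal_chunk_bounds_py : Prop := ∀ (rows : List (List (String × Int))), Dom_chunk_bounds_py rows → Spec_chunk_bounds_py rows (chunk_bounds_py rows)

-- ===== LEMMAS AND PROOFS =====


-- ===== VERDICT (by name: the statement is the Claim_ definition above) =====
lemma pvFold_some (t : List (List (String × Int))) :
    ∀ a b c d e f : Int,
      t.foldl pvStep (some (a, b, c, d, e, f)) =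
        some ((t.map (fun v => pvLookup v "x")).foldl min a,
              (t.map (fun v => pvLookup v "x")).foldl max b,
              (t.map (fun v => pvLookup v "y")).foldl min c,
              (t.map (fun v => pvLookup v "y")).foldl max d,
              (t.map (fun v => pvLookup v "z")).foldl min e,
              (t.map (fun v => pvLookup v "z")).foldl max f) := by
  induction t with
  | nil => intro a b c d e f; simp
  | cons v t ih =>
      intro a b c d e f
      simp only [List.foldl_cons, List.map_cons, pvStep]
      exact ih _ _ _ _ _ _

theorem chunk_bounds_py_spec : Claim_equal_chunk_bounds_py := by
  intro rows _
  unfold Spec_chunk_bounds_py chunk_bounds_py chunk_bounds_py_alt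
  cases rows with
  | nil => simp [PySem.List.min?, PySem.List.max?]
  | cons v t =>
      simp only [List.map_cons, List.foldl_cons, pvStep,
        PySem.List.min?_id_cons, PySem.List.max?_id_cons, Option.getD_some,
        pvFold_some]
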